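-- pv_equiv track=rewrite | github.com/CharannKrishna/Mrnd-PythonCourse | finaltest_problem1.py | transform
-- ===== SOURCE A (Python) =====
-- import string
--
-- def cal_ord(word):
--     sum=0
--     for i in word:
--         sum+=ord(i)
--     return sum
--
-- def transform(sentence):
--     if not isinstance(sentence,str):
--         raise TypeError
--     result=''
--     d=dict(zip(string.ascii_lowercase + string.ascii_uppercase + string.digits, string.ascii_lowercase[::-1] + string.ascii_uppercase[::-1] + string.digits[::-1]))
--     for i in sentence:
--         if i==' ':
--             result+=i
--         elif (i in string.ascii_letters) or (i in string.digits):
--             result+=d[i]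
--
--     result=result.split(' ')
--     result=result[::-1]
--     result=sorted(result,key=cal_ord)
--     result=' '.join(result)
--     return result
-- ===== SOURCE B (Python) =====
-- def transform(sentence):
--     if not isinstance(sentence, str):
--         raise TypeError
--     # One right-to-left scan: words come out already in reversed order, each with
--     # its ord-sum accumulated on the fly; a leading sentinel space flushes the
--     # first word.  Then a single tuple sort (sum, position) replaces A's
--     # reverse + stable sort, and the mapping is closed-form arithmetic, no dict.
--     decorated = []
--     word = []          # mapped chars of the current word, collected back-to-front
--     total = 0
--     for ch in reversed(' ' + sentence):
--         if ch == ' ':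
--             decorated.append((total, len(decorated), ''.join(reversed(word))))
--             word = []
--             total = 0
--         else:
--             o = ord(ch)
--             if 97 <= o <= 122:
--                 m = 219 - o
--             elif 65 <= o <= 90:
--                 m = 155 - o
--             elif 48 <= o <= 57:
--                 m = 105 - o
--             else:
--                 continue
--             word.append(chr(m))
--             total += m
--     decorated.sort(key=lambda t: (t[0], t[1]))
--     return ' '.join(t[2] for t in decorated)
-- ===== Notes on version B (the rewrite author's own statement) =====
-- stated objective: alternative
-- what changed: B replaces A's dict-translation/string-accumulation/split/reverse/stable-sort pipeline by a single right-to-left character scan that builds each word and its ord-sum on the fly (closed-form arithmetic reflection, no dict, no intermediate string, no split, no reverse step), then one plain sort of (sum, position) tuples (decorate-sort-undecorate) and a join.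
import Mathlib
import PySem

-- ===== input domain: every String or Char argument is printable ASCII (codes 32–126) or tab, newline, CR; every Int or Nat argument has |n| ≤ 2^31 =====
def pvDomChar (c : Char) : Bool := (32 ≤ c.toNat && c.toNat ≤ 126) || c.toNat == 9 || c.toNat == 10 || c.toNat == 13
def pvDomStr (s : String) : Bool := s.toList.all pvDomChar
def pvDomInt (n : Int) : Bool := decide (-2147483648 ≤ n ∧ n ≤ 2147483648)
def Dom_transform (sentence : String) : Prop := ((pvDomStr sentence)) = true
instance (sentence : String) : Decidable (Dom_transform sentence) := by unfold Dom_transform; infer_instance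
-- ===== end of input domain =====

-- B replaces A's dict-translation / string-accumulation / split / reverse / stable-sort pipeline
-- by a single right-to-left scan building each word and its ord-sum on the fly, followed by one
-- plain (sum, position) tuple sort; objective: alternative. (Python's TypeError guard for
-- non-str input is outside the type convention's domain and not modelled.)

-- ===== PORT A =====
def calOrd (w : List Char) : Int := w.foldl (fun s c => s + (c.toNat : Int)) 0

def pvLowers : List Char := "abcdefghijklmnopqrstuvwxyz".toList
def pvUppers : List Char := "ABCDEFGHIJKLMNOPQRSTUVWXYZ".toList
def pvDigitsL : List Char := "0123456789".toList

-- d = dict(zip(lower+upper+digits, lower[::-1]+upper[::-1]+digits[::-1]))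
def pvDict : PySem.Dict Char Char :=
  ((pvLowers ++ pvUppers ++ pvDigitsL).zip
      (pvLowers.reverse ++ pvUppers.reverse ++ pvDigitsL.reverse)).foldl
    (fun d kv => d.insert kv.1 kv.2) PySem.Dict.empty

-- result built char by char; then result.split(' '), result[::-1], sorted(key=cal_ord), ' '.join
-- d[i]: the guard guarantees the key is present, so getD's default is never used
def transform (sentence : String) : String :=
  String.ofList (PySem.Chars.join [' ']
    (PySem.List.sorted
      ((PySem.List.slice?
        (PySem.Chars.splitOn
          (sentence.toList.foldl (fun r c =>
            if c == ' ' then r ++ [c]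
            else if PySem.Chars.isIn [c] (pvLowers ++ pvUppers) || PySem.Chars.isIn [c] pvDigitsL then
              r ++ [pvDict.getD c ' ']
            else r) [])
          [' '])
        none none (-1)).getD [])
      calOrd))

-- ===== PORT B =====
-- the if/elif ladder computing the reflected code point; none = the loop's 'continue'
def bm? (c : Char) : Option Int :=
  let o : Int := (c.toNat : Int)
  if 97 ≤ o ∧ o ≤ 122 then some (219 - o)
  else if 65 ≤ o ∧ o ≤ 90 then some (155 - o)
  else if 48 ≤ o ∧ o ≤ 57 then some (105 - o)
  else none

-- one step of the right-to-left scan: state = (decorated, word collected back-to-front, total)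
def bstep (st : List (Int × Int × List Char) × List Char × Int) (c : Char) :
    List (Int × Int × List Char) × List Char × Int :=
  if c = ' ' then (st.1 ++ [(st.2.2, (st.1.length : Int), st.2.1.reverse)], [], 0)
  else
    match bm? c with
    | none => st
    | some m => (st.1, st.2.1 ++ [Char.ofNat m.toNat], st.2.2 + m)

-- for ch in reversed(' ' + sentence): …; decorated.sort(key=lambda t: (t[0], t[1])); ' '.join
def transform_alt (sentence : String) : String :=
  let st := ((' ' :: sentence.toList).reverse).foldl bstep ([], [], 0)
  String.ofList (PySem.Chars.join [' ']
    ((PySem.List.sorted2 st.1 (·.1) (·.2.1)).map (·.2.2)))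

-- ===== PRECONDITION & SPEC =====
def Spec_transform (sentence : String) (out : String) : Prop := out = transform_alt sentence
instance (sentence : String) (out : String) : Decidable (Spec_transform sentence out) := by unfold Spec_transform; infer_instance

-- ===== CLAIM (what is proved, stated in full; the proofs are below) =====
def Claim_equal_transform : Prop := ∀ (sentence : String), Dom_transform sentence → Spec_transform sentence (transform sentence)

-- ===== LEMMAS AND PROOFS =====

-- per-character emission of A's accumulation loop
def emitA (c : Char) : List Char :=
  if c == ' ' then [' ']
  else if PySem.Chars.isIn [c] (pvLowers ++ pvUppers) || PySem.Chars.isIn [c] pvDigitsL then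
    [pvDict.getD c ' ']
  else []

-- per-character emission, isalnum-shaped
def reflectChar (c : Char) : Char :=
  if PySem.Chars.islower c then Char.ofNat (219 - c.toNat)
  else if PySem.Chars.isupper c then Char.ofNat (155 - c.toNat)
  else Char.ofNat (105 - c.toNat)

def emitB (c : Char) : List Char :=
  if c = ' ' then [' '] else if PySem.Chars.isalnum c then [reflectChar c] else []

-- the transformed word a segment of A's split yields
def fword (w : List Char) : List Char :=
  (w.filter (fun c => PySem.Chars.isalnum c)).map reflectChar

-- simple recursive characterisation of s.split(' ')
def pySplit1 : List Char → List (List Char)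
  | [] => [[]]
  | c :: t => if c = ' ' then [] :: pySplit1 t else (pySplit1 t).modifyHead (c :: ·)

lemma pySplit1_ne_nil (l : List Char) : pySplit1 l ≠ [] := by
  cases l with
  | nil => simp [pySplit1]
  | cons c t =>
    simp only [pySplit1]
    split
    · simp
    · cases h : pySplit1 t with
      | nil => exact absurd h (pySplit1_ne_nil t)
      | cons x xs => simp

lemma splitOn_go_eq (fuel : Nat) (l cur : List Char) (acc : List (List Char))
    (h : l.length < fuel) :
    PySem.Chars.splitOn.go [' '] fuel l cur acc =
      acc.reverse ++ (pySplit1 l).modifyHead (cur.reverse ++ ·) := by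
  induction fuel generalizing l cur acc with
  | zero => omega
  | succ f ih =>
    cases l with
    | nil =>
      simp [PySem.Chars.splitOn.go, pySplit1]
    | cons c rest =>
      by_cases hc : c = ' '
      · subst hc
        have h1 : rest.length < f := by simpa using h
        rw [show PySem.Chars.splitOn.go [' '] (f + 1) (' ' :: rest) cur acc =
            PySem.Chars.splitOn.go [' '] f rest [] (cur.reverse :: acc) from by
          simp [PySem.Chars.splitOn.go, List.isPrefixOf]]
        rw [ih rest [] (cur.reverse :: acc) h1]
        cases hs : pySplit1 rest with
        | nil => exact absurd hs (pySplit1_ne_nil rest)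
        | cons x xs => simp [pySplit1, hs]
      · have h1 : rest.length < f := by simpa using h
        rw [show PySem.Chars.splitOn.go [' '] (f + 1) (c :: rest) cur acc =
            PySem.Chars.splitOn.go [' '] f rest (c :: cur) acc from by
          simp [PySem.Chars.splitOn.go, List.isPrefixOf, Ne.symm hc]]
        rw [ih rest (c :: cur) acc h1]
        cases hs : pySplit1 rest with
        | nil => exact absurd hs (pySplit1_ne_nil rest)
        | cons x xs => simp [pySplit1, hs, hc]

lemma splitOn_space (l : List Char) :
    PySem.Chars.splitOn l [' '] = pySplit1 l := by
  have h1 := splitOn_go_eq (l.length + 1) l [] [] (by omega)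
  have h2 : (pySplit1 l).modifyHead (([] : List Char).reverse ++ ·) = pySplit1 l := by
    cases hp : pySplit1 l <;> simp
  rw [h2] at h1
  simpa [PySem.Chars.splitOn] using h1

-- the per-character facts both sides need, checked on every character the domain admits
-- (codes 9–13 and 32–126): A's dict emission = isalnum emission, no emitted char is a space,
-- and B's arithmetic ladder agrees with the isalnum emission (with a valid code point)
def pvCheck (n : Nat) : Bool :=
  (emitA (Char.ofNat n) == emitB (Char.ofNat n)) &&
  (Char.ofNat n == ' ' || (emitB (Char.ofNat n)).all (· != ' ')) &&
  (Char.ofNat n == ' ' ||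
    (match bm? (Char.ofNat n) with
     | none => emitB (Char.ofNat n) == []
     | some m => emitB (Char.ofNat n) == [Char.ofNat m.toNat] &&
         (((Char.ofNat m.toNat).toNat : Int) == m)))

set_option maxRecDepth 8192 in
lemma pvCheck1 : ((List.range' 9 5).all pvCheck) = true := by decide
set_option maxRecDepth 8192 in
lemma pvCheck2 : ((List.range' 32 32).all pvCheck) = true := by decide
set_option maxRecDepth 8192 in
lemma pvCheck3 : ((List.range' 64 32).all pvCheck) = true := by decide
set_option maxRecDepth 8192 in
lemma pvCheck4 : ((List.range' 96 31).all pvCheck) = true := by decide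

lemma pvCheck_dom (c : Char) (h : pvDomChar c = true) : pvCheck c.toNat = true := by
  unfold pvDomChar at h
  simp only [Bool.or_eq_true, Bool.and_eq_true, decide_eq_true_eq, beq_iff_eq] at h
  rcases h with ((⟨h1, h2⟩ | h) | h) | h
  · by_cases h32 : c.toNat < 64
    · exact List.all_eq_true.mp pvCheck2 c.toNat (List.mem_range'_1.mpr ⟨by omega, by omega⟩)
    · by_cases h64 : c.toNat < 96
      · exact List.all_eq_true.mp pvCheck3 c.toNat (List.mem_range'_1.mpr ⟨by omega, by omega⟩)
      · exact List.all_eq_true.mp pvCheck4 c.toNat (List.mem_range'_1.mpr ⟨by omega, by omega⟩)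
  all_goals exact List.all_eq_true.mp pvCheck1 c.toNat (List.mem_range'_1.mpr ⟨by omega, by omega⟩)

lemma charFact (c : Char) (h : pvDomChar c = true) :
    emitA c = emitB c ∧ (c ≠ ' ' → ∀ x ∈ emitB c, x ≠ ' ') := by
  have hn := pvCheck_dom c h
  unfold pvCheck at hn
  rw [Char.ofNat_toNat] at hn
  simp only [Bool.and_eq_true, Bool.or_eq_true, beq_iff_eq, List.all_eq_true, bne_iff_ne] at hn
  exact ⟨hn.1.1, fun hc x hx => (hn.1.2.resolve_left hc) x hx⟩

-- B's arithmetic ladder against the isalnum emission, on domain characters other than ' '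
lemma charFactB (c : Char) (h : pvDomChar c = true) (hc : c ≠ ' ') :
    (bm? c = none ∧ emitB c = []) ∨
    (∃ m, bm? c = some m ∧ emitB c = [Char.ofNat m.toNat] ∧
      ((Char.ofNat m.toNat).toNat : Int) = m) := by
  have hn := pvCheck_dom c h
  unfold pvCheck at hn
  rw [Char.ofNat_toNat] at hn
  simp only [Bool.and_eq_true, Bool.or_eq_true, beq_iff_eq] at hn
  have h3 := hn.2.resolve_left hc
  cases hb : bm? c with
  | none =>
    left
    rw [hb] at h3
    simpa using h3
  | some m =>
    right
    rw [hb] at h3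
    simp only [Bool.and_eq_true, beq_iff_eq] at h3
    exact ⟨m, rfl, h3.1, h3.2⟩

lemma split_flatMap (l : List Char) (h : ∀ c ∈ l, pvDomChar c = true) :
    pySplit1 (l.flatMap emitB) = (pySplit1 l).map fword := by
  induction l with
  | nil => simp [pySplit1, fword]
  | cons c t ih =>
    have ht : ∀ c ∈ t, pvDomChar c = true := fun x hx => h x (List.mem_cons_of_mem _ hx)
    have iht := ih ht
    by_cases hc : c = ' '
    · subst hc
      simp [emitB, pySplit1, iht, fword]
    · have hns : ∀ x ∈ emitB c, x ≠ ' ' :=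
        (charFact c (h c (List.mem_cons_self))).2 hc
      by_cases ha : PySem.Chars.isalnum c = true
      · have he : emitB c = [reflectChar c] := by simp [emitB, hc, ha]
        have hr : reflectChar c ≠ ' ' := hns _ (by simp [he])
        cases hs : pySplit1 t with
        | nil => exact absurd hs (pySplit1_ne_nil t)
        | cons x xs =>
          simp only [List.flatMap_cons, he, List.singleton_append, pySplit1, if_neg hr,
            iht, hs, List.map_cons, List.modifyHead_cons, if_neg hc]
          simp [fword, ha]
      · have he : emitB c = [] := by simp [emitB, hc, ha]
        cases hs : pySplit1 t with
        | nil => exact absurd hs (pySplit1_ne_nil t)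
        | cons x xs =>
          simp only [List.flatMap_cons, he, List.nil_append, iht, hs, pySplit1,
            if_neg hc, List.map_cons, List.modifyHead_cons]
          simp [fword, ha]

lemma loop_eq_flatMap (l : List Char) :
    l.foldl (fun r c =>
      if c == ' ' then r ++ [c]
      else if PySem.Chars.isIn [c] (pvLowers ++ pvUppers) || PySem.Chars.isIn [c] pvDigitsL then
        r ++ [pvDict.getD c ' ']
      else r) [] = l.flatMap emitA := by
  have hf : (fun (r : List Char) c =>
      if c == ' ' then r ++ [c]
      else if PySem.Chars.isIn [c] (pvLowers ++ pvUppers) || PySem.Chars.isIn [c] pvDigitsL then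
        r ++ [pvDict.getD c ' ']
      else r) = fun r c => r ++ emitA c := by
    funext r c
    by_cases h1 : c = ' '
    · simp [emitA, h1]
    · by_cases h2 : (PySem.Chars.isIn [c] (pvLowers ++ pvUppers) || PySem.Chars.isIn [c] pvDigitsL) = true
      · simp [emitA, h1, h2]
      · simp [emitA, h1, h2]
  rw [hf, PySem.List.foldl_append_eq_flatMap, List.nil_append]

lemma flatMap_emit_eq (l : List Char) (h : ∀ c ∈ l, pvDomChar c = true) :
    l.flatMap emitA = l.flatMap emitB := by
  induction l with
  | nil => rfl
  | cons c t ih =>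
    have hc := (charFact c (h c List.mem_cons_self)).1
    simp only [List.flatMap_cons, hc, ih (fun x hx => h x (List.mem_cons_of_mem _ hx))]

lemma calOrd_eq_sum (w : List Char) : calOrd w = (w.map (fun c => (c.toNat : Int))).sum := by
  simp only [calOrd]
  rw [PySem.List.foldl_add w (fun c => (c.toNat : Int)) 0, zero_add]

lemma calOrd_cons (c : Char) (w : List Char) : calOrd (c :: w) = (c.toNat : Int) + calOrd w := by
  simp [calOrd_eq_sum]

lemma fword_cons (c : Char) (w : List Char) (hc : c ≠ ' ') :
    fword (c :: w) = emitB c ++ fword w := by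
  by_cases ha : PySem.Chars.isalnum c = true <;> simp [fword, emitB, hc, ha]

lemma dom_ascii (s : String) (hd : Dom_transform s) :
    ∀ c ∈ s.toList, pvDomChar c = true := by
  intro c hc
  unfold Dom_transform pvDomStr at hd
  exact (List.all_eq_true.mp hd) c hc

-- B-side: the decoration of a word list with (ord-sum, position)
def decor : List (List Char) → Nat → List (Int × Int × List Char)
  | [], _ => []
  | w :: t, k => (calOrd w, (k : Int), w) :: decor t (k + 1)

lemma decor_append (ys : List (List Char)) (y : List Char) (k : Nat) :
    decor (ys ++ [y]) k = decor ys k ++ [(calOrd y, ((k + ys.length : Nat) : Int), y)] := by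
  induction ys generalizing k with
  | nil => simp [decor]
  | cons w t ih =>
    have hk : k + 1 + t.length = k + (t.length + 1) := by omega
    simp only [List.cons_append, decor, ih (k + 1), List.length_cons, hk]

lemma length_decor (ys : List (List Char)) (k : Nat) : (decor ys k).length = ys.length := by
  induction ys generalizing k with
  | nil => rfl
  | cons w t ih => simp [decor, ih]

lemma mem_decor (ys : List (List Char)) (k : Nat) (q : Int × Int × List Char)
    (hq : q ∈ decor ys k) : q.1 = calOrd q.2.2 ∧ q.2.1 < (k : Int) + ys.length := by
  induction ys generalizing k with
  | nil => simp [decor] at hq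
  | cons w t ih =>
    simp only [decor, List.mem_cons] at hq
    rcases hq with hq | hq
    · subst hq
      refine ⟨rfl, by simp only [List.length_cons]; push_cast; omega⟩
    · obtain ⟨h1, h2⟩ := ih (k + 1) hq
      refine ⟨h1, by simp only [List.length_cons] at h2 ⊢; push_cast at h2 ⊢; omega⟩

-- the right-to-left scan computes the decorated reversed word list of pySplit1
lemma scan_spec (l : List Char) (hd : ∀ c ∈ l, pvDomChar c = true) :
    ∃ w0 rest, pySplit1 l = w0 :: rest ∧
      l.reverse.foldl bstep ([], [], 0) =
        (decor ((rest.map fword).reverse) 0, (fword w0).reverse, calOrd (fword w0)) := by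
  induction l with
  | nil => exact ⟨[], [], rfl, by simp [decor, fword, calOrd]⟩
  | cons c t ih =>
    obtain ⟨w0, rest, hs, hf⟩ := ih (fun x hx => hd x (List.mem_cons_of_mem _ hx))
    have hstep : (c :: t).reverse.foldl bstep ([], [], 0) =
        bstep (t.reverse.foldl bstep ([], [], 0)) c := by
      rw [List.reverse_cons, List.foldl_append]
      rfl
    by_cases hc : c = ' '
    · subst hc
      refine ⟨[], w0 :: rest, by simp [pySplit1, hs], ?_⟩
      rw [hstep, hf]
      simp only [bstep]
      rw [length_decor]
      have : decor (((w0 :: rest).map fword).reverse) 0 =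
          decor ((rest.map fword).reverse) 0 ++
            [(calOrd (fword w0), ((0 + ((rest.map fword).reverse).length : Nat) : Int), fword w0)] := by
        rw [List.map_cons, List.reverse_cons, decor_append]
      rw [this]
      simp [fword, calOrd]
    · refine ⟨c :: w0, rest, by simp [pySplit1, hs, hc], ?_⟩
      rw [hstep, hf]
      rcases charFactB c (hd c List.mem_cons_self) hc with ⟨hb, he⟩ | ⟨m, hb, he, hm⟩
      · have hfw : fword (c :: w0) = fword w0 := by rw [fword_cons c w0 hc, he]; rfl
        simp [bstep, hc, hb, hfw]
      · have hfw : fword (c :: w0) = Char.ofNat m.toNat :: fword w0 := by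
          rw [fword_cons c w0 hc, he]; rfl
        simp only [bstep, if_neg hc, hb, hfw, calOrd_cons, hm, List.reverse_cons,
          Prod.mk.injEq]
        exact ⟨trivial, trivial, by ring⟩

-- inserting the element with the largest position: the lexicographic tuple insertion
-- projects to A's key insertion
lemma ins_map (p : Int × Int × List Char) (acc : List (Int × Int × List Char))
    (hp : p.1 = calOrd p.2.2)
    (h : ∀ q ∈ acc, q.1 = calOrd q.2.2 ∧ q.2.1 < p.2.1) :
    (PySem.List.insertBy
        (fun a b => decide (a.1 < b.1) || !decide (b.1 < a.1) && decide (a.2.1 < b.2.1))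
        p acc).map (·.2.2) =
      PySem.List.insertBy (fun a b => decide (calOrd a < calOrd b)) p.2.2
        (acc.map (·.2.2)) := by
  induction acc with
  | nil => rfl
  | cons q t ih =>
    obtain ⟨hq1, hq2⟩ := h q List.mem_cons_self
    have hlex : (decide (p.1 < q.1) || !decide (q.1 < p.1) && decide (p.2.1 < q.2.1)) =
        decide (calOrd p.2.2 < calOrd q.2.2) := by
      have : decide (p.2.1 < q.2.1) = false := by simp; omega
      rw [this, hp, hq1]
      simp
    simp only [PySem.List.insertBy, hlex]
    by_cases hlt : calOrd p.2.2 < calOrd q.2.2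
    · simp [PySem.List.insertBy, hlt]
    · have hR : PySem.List.insertBy (fun a b => decide (calOrd a < calOrd b)) p.2.2
          (q.2.2 :: t.map (·.2.2)) =
          q.2.2 :: PySem.List.insertBy (fun a b => decide (calOrd a < calOrd b)) p.2.2
            (t.map (·.2.2)) := by
        simp [PySem.List.insertBy, hlt]
      simp only [decide_eq_true_eq, if_neg hlt, List.map_cons, hR]
      rw [← ih (fun r hr => h r (List.mem_cons_of_mem _ hr))]

-- decorate–sort–undecorate = stable sort by calOrd
lemma ssd (vs : List (List Char)) (k : Nat) :
    (PySem.List.sorted2 (decor vs k) (·.1) (·.2.1)).map (·.2.2) =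
      PySem.List.sorted vs calOrd := by
  induction vs using List.reverseRecOn with
  | nil => rfl
  | append_singleton us y ih =>
    rw [decor_append]
    have hS2 : ∀ (xs : List (Int × Int × List Char)) (p : Int × Int × List Char),
        PySem.List.sorted2 (xs ++ [p]) (·.1) (·.2.1) =
          PySem.List.insertBy
            (fun a b => decide (a.1 < b.1) || !decide (b.1 < a.1) && decide (a.2.1 < b.2.1))
            p (PySem.List.sorted2 xs (·.1) (·.2.1)) := by
      intro xs p
      rw [show ∀ zs, PySem.List.sorted2 zs (·.1 : Int × Int × List Char → Int) (·.2.1) =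
          zs.foldl (fun acc x => PySem.List.insertBy
            (fun a b => decide (a.1 < b.1) || !decide (b.1 < a.1) && decide (a.2.1 < b.2.1))
            x acc) [] from fun zs => rfl,
        show ∀ zs, PySem.List.sorted2 zs (·.1 : Int × Int × List Char → Int) (·.2.1) =
          zs.foldl (fun acc x => PySem.List.insertBy
            (fun a b => decide (a.1 < b.1) || !decide (b.1 < a.1) && decide (a.2.1 < b.2.1))
            x acc) [] from fun zs => rfl,
        List.foldl_append]
      rfl
    rw [hS2]
    have hmem : ∀ q ∈ PySem.List.sorted2 (decor us k) (·.1) (·.2.1),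
        q.1 = calOrd q.2.2 ∧ q.2.1 < ((k + us.length : Nat) : Int) := by
      intro q hq
      have hq' : q ∈ decor us k := (PySem.List.sorted2_perm _ _ _ _).mem_iff.mp hq
      obtain ⟨h1, h2⟩ := mem_decor us k q hq'
      exact ⟨h1, by push_cast at h2 ⊢; omega⟩
    rw [ins_map _ _ rfl hmem, ih]
    rw [PySem.List.sorted_eq_foldl_insertBy, PySem.List.sorted_eq_foldl_insertBy,
      List.foldl_append]
    rfl

-- ===== VERDICT (by name: the statement is the Claim_ definition above) =====
theorem transform_spec : Claim_equal_transform := by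
  intro s hd
  unfold Spec_transform transform transform_alt
  have hA : ∀ c ∈ s.toList, pvDomChar c = true := dom_ascii s hd
  obtain ⟨w0, rest, hs, hf⟩ := scan_spec s.toList hA
  have hfold : ((' ' :: s.toList).reverse).foldl bstep ([], [], 0) =
      bstep (s.toList.reverse.foldl bstep ([], [], 0)) ' ' := by
    rw [List.reverse_cons, List.foldl_append]
    rfl
  rw [loop_eq_flatMap, flatMap_emit_eq _ hA, splitOn_space, split_flatMap _ hA,
    PySem.List.slice?_none_none_neg_one, hfold, hf]
  have hdec : decor ((rest.map fword).reverse) 0 ++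
      [(calOrd (fword w0), ((decor ((rest.map fword).reverse) 0).length : Int), fword w0)] =
      decor (((w0 :: rest).map fword).reverse) 0 := by
    rw [List.map_cons, List.reverse_cons, decor_append, length_decor]
    simp
  simp only [bstep, Option.getD_some, hs, if_pos, List.reverse_reverse]
  rw [hdec, ssd]
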